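-- pv_equiv track=rewrite | github.com/yuliakachurovska/AlgoDataStruct | hw13/t13_13_e5205.py | solve
-- ===== SOURCE A (Python) =====
-- Mod = 301907
--
-- def solve(template):
--     n = len(template)
--     stack = []
--     ways = [0] * (n + 1)
--     ways[0] = 1
--
--     for i in range(n):
--         new_w = [0] * (n + 1)
--         for open in range(n):
--             if ways[open] == 0:
--                 continue
--
--             if template[i] in "(":
--                 new_w[open + 1] = (new_w[open + 1] + ways[open]) % Mod
--                 stack.append('(')
--
--             if template[i] in ")" and open > 0:
--                 new_w[open - 1] = (new_w[open - 1] + ways[open]) % Mod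
--                 if stack and stack[-1] == '(':
--                     stack.pop()
--
--             if template[i] == "?":
--                 new_w[open + 1] = (new_w[open + 1] + ways[open]) % Mod
--                 if open > 0:
--                     new_w[open - 1] = (new_w[open - 1] + ways[open]) % Mod
--
--         ways = new_w
--
--     return ways[0]
-- ===== SOURCE B (Python) =====
-- Mod = 301907
--
-- def solve(template):
--     n = len(template)
--     memo = {}
--
--     def count(i, depth):
--         key = (i, depth)
--         if key in memo:
--             return memo[key]
--         if i == n:
--             r = 1 if depth == 0 else 0
--         else:
--             c = template[i]
--             if c == '(':
--                 r = count(i + 1, depth + 1)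
--             elif c == ')':
--                 r = count(i + 1, depth - 1) if depth > 0 else 0
--             elif c == '?':
--                 r = count(i + 1, depth + 1)
--                 if depth > 0:
--                     r = (r + count(i + 1, depth - 1)) % Mod
--             else:
--                 r = 0
--         memo[key] = r
--         return r
--
--     return count(0, 0)
-- ===== Notes on version B (the rewrite author's own statement) =====
-- stated objective: faster
-- what changed: Replaced the bottom-up sweep that scans all n depth slots per character (plus a vestigial stack) by a top-down memoized recursion count(i, depth) that only ever visits reachable (position, depth) states.
import Mathlib
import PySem

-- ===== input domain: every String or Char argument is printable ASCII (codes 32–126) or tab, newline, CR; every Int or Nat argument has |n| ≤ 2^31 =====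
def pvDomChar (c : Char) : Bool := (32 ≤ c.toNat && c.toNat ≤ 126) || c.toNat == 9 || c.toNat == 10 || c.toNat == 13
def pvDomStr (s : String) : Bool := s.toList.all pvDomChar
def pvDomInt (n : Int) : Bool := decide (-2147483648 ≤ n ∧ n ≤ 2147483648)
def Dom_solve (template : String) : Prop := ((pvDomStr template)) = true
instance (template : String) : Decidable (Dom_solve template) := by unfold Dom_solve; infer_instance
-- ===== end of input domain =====

-- B replaces A's bottom-up per-character sweep over all n depth slots (with its vestigial
-- stack) by a top-down memoized recursion on (position, depth) that only visits reachable
-- states; a timing run measured B faster. Return values agree on every input.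

-- ===== PORT A =====
-- Mod = 301907
def pvModA : Int := 301907

-- body of A's inner `for open in range(n)` loop; `ways` is the previous row,
-- state = (new_w, stack)
def solveInner (c : Char) (ways : List Int) (st : List Int × List Char) (opn : Nat) :
    List Int × List Char :=
  if ways.getD opn 0 = 0 then st
  else
    let st :=
      if c = '(' then
        (st.1.set (opn + 1) (PySem.Int.mod (st.1.getD (opn + 1) 0 + ways.getD opn 0) pvModA),
         st.2 ++ ['('])
      else st
    let st :=
      if c = ')' ∧ 0 < opn then
        ((st.1.set (opn - 1) (PySem.Int.mod (st.1.getD (opn - 1) 0 + ways.getD opn 0) pvModA)),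
         if st.2 ≠ [] ∧ st.2.getLast? = some '(' then st.2.dropLast else st.2)
      else st
    if c = '?' then
      let w := st.1.set (opn + 1) (PySem.Int.mod (st.1.getD (opn + 1) 0 + ways.getD opn 0) pvModA)
      let w := if 0 < opn then
          w.set (opn - 1) (PySem.Int.mod (w.getD (opn - 1) 0 + ways.getD opn 0) pvModA)
        else w
      (w, st.2)
    else st

-- body of A's outer `for i in range(n)` loop (iterates over the characters)
def solveStep (n : Nat) (st : List Int × List Char) (c : Char) : List Int × List Char :=
  (List.range n).foldl (solveInner c st.1) (List.replicate (n + 1) (0 : Int), st.2)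

def solve (template : String) : Int :=
  let n := template.toList.length
  let ways := (List.replicate (n + 1) (0 : Int)).set 0 1
  let st := template.toList.foldl (solveStep n) (ways, ([] : List Char))
  st.1.getD 0 0

-- ===== PORT B =====
-- memoized count(i, depth); the Lean port keys the memo by (remaining-suffix length, depth),
-- which is the same key as Python's (i, depth) under the bijection i = n - length.
def countB (cs : List Char) (depth : Nat) (memo : PySem.Dict (Nat × Nat) Int) :
    Int × PySem.Dict (Nat × Nat) Int :=
  match memo.get? (cs.length, depth) with
  | some v => (v, memo)
  | none =>
    let rm : Int × PySem.Dict (Nat × Nat) Int :=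
      match cs with
      | [] => ((if depth = 0 then 1 else 0 : Int), memo)
      | c :: rest =>
        if c = '(' then countB rest (depth + 1) memo
        else if c = ')' then
          (if 0 < depth then countB rest (depth - 1) memo else (0, memo))
        else if c = '?' then
          let p := countB rest (depth + 1) memo
          if 0 < depth then
            let q := countB rest (depth - 1) p.2
            (PySem.Int.mod (p.1 + q.1) 301907, q.2)
          else p
        else (0, memo)
    (rm.1, rm.2.insert (cs.length, depth) rm.1)

def solve_alt (template : String) : Int :=
  (countB template.toList 0 PySem.Dict.empty).1

-- ===== PRECONDITION & SPEC =====
def Spec_solve (template : String) (out : Int) : Prop := out = solve_alt template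
instance (template : String) (out : Int) : Decidable (Spec_solve template out) := by unfold Spec_solve; infer_instance

-- ===== CLAIM (what is proved, stated in full; the proofs are below) =====
def Claim_equal_solve : Prop := ∀ (template : String), Dom_solve template → Spec_solve template (solve template)

-- ===== LEMMAS AND PROOFS =====

def pvP : List Char → Nat → Nat → Int
  | [], d, e => if d = e then 1 else 0
  | c :: cs, d, e =>
    (if c = '(' then pvP cs (d + 1) e else 0) +
    (if c = ')' ∧ 0 < d then pvP cs (d - 1) e else 0) +
    (if c = '?' then pvP cs (d + 1) e + (if 0 < d then pvP cs (d - 1) e else 0) else 0)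

theorem pvChar_cases (c : Char) : c = '(' ∨ c = ')' ∨ c = '?' ∨ (c ≠ '(' ∧ c ≠ ')' ∧ c ≠ '?') := by
  tauto

theorem pvP_eq_zero_of_gt (cs : List Char) (d e : Nat) (h : d + cs.length < e) : pvP cs d e = 0 := by
  induction cs generalizing d with
  | nil => simp only [List.length_nil, Nat.add_zero] at h; simp only [pvP]
           split_ifs with h1 <;> omega
  | cons c cs ih =>
    simp only [List.length_cons] at h
    simp only [pvP, ih (d+1) (by omega), ih (d-1) (by omega)]
    split_ifs <;> simp

theorem pvP_snoc (p : List Char) (c : Char) (d e : Nat) :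
    pvP (p ++ [c]) d e =
      (if c = '(' ∧ 0 < e then pvP p d (e - 1) else 0) +
      (if c = ')' then pvP p d (e + 1) else 0) +
      (if c = '?' then pvP p d (e + 1) + (if 0 < e then pvP p d (e - 1) else 0) else 0) := by
  induction p generalizing d with
  | nil =>
    rcases pvChar_cases c with rfl | rfl | rfl | ⟨h1, h2, h3⟩
    · simp [pvP]; split_ifs <;> omega
    · simp [pvP]; split_ifs <;> omega
    · simp [pvP]; split_ifs <;> omega
    · simp [pvP, h1, h2, h3]
  | cons a p ih =>
    simp only [List.cons_append, pvP, ih]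
    split_ifs <;> ring

-- memo-free version of B's recursion
def pvCm : List Char → Nat → Int
  | [], d => if d = 0 then 1 else 0
  | c :: rest, d =>
    if c = '(' then pvCm rest (d + 1)
    else if c = ')' then (if 0 < d then pvCm rest (d - 1) else 0)
    else if c = '?' then
      (if 0 < d then PySem.Int.mod (pvCm rest (d + 1) + pvCm rest (d - 1)) 301907
       else pvCm rest (d + 1))
    else 0

theorem pvCm_eq (cs : List Char) (d : Nat) : pvCm cs d = pvP cs d 0 % 301907 := by
  induction cs generalizing d with
  | nil => simp only [pvCm, pvP]; split_ifs <;> norm_num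
  | cons c rest ih =>
    rcases pvChar_cases c with rfl | rfl | rfl | ⟨h1, h2, h3⟩
    · simp [pvCm, pvP, ih]
    · by_cases hd : 0 < d <;> simp [pvCm, pvP, ih, hd]
    · by_cases hd : 0 < d <;>
        simp [pvCm, pvP, ih, hd,
          PySem.Int.mod_eq_emod_of_pos (show (0 : Int) < 301907 by norm_num), ← Int.add_emod]
    · simp [pvCm, pvP, h1, h2, h3]

def pvInv (full : List Char) (memo : PySem.Dict (Nat × Nat) Int) : Prop :=
  ∀ l d v, memo.get? (l, d) = some v → v = pvCm (full.drop (full.length - l)) d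

theorem pv_suffix_drop {cs full : List Char} (h : cs <:+ full) :
    full.drop (full.length - cs.length) = cs := by
  obtain ⟨t, rfl⟩ := h
  simp

theorem pvInv_insert (full cs : List Char) (memo : PySem.Dict (Nat × Nat) Int)
    (hsuf : cs <:+ full) (hInv : pvInv full memo) (d : Nat) :
    pvInv full (memo.insert (cs.length, d) (pvCm cs d)) := by
  intro l d' v hget
  rw [PySem.Dict.get?_insert] at hget
  split at hget
  · rename_i heq
    obtain ⟨rfl, rfl⟩ := Prod.mk.injEq .. ▸ heq
    rw [pv_suffix_drop hsuf]
    exact (Option.some.injEq .. ▸ hget).symm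
  · exact hInv _ _ _ hget

theorem countB_correct (full : List Char) : ∀ (cs : List Char) (d : Nat)
    (memo : PySem.Dict (Nat × Nat) Int), cs <:+ full → pvInv full memo →
    (countB cs d memo).1 = pvCm cs d ∧ pvInv full (countB cs d memo).2 := by
  intro cs
  induction cs with
  | nil =>
    intro d memo hsuf hInv
    rw [countB]
    cases hget : memo.get? (([] : List Char).length, d) with
    | some v =>
      have := hInv _ _ _ hget
      rw [pv_suffix_drop hsuf] at this
      exact ⟨this, hInv⟩
    | none =>
      refine ⟨rfl, ?_⟩
      have h4 := pvInv_insert full [] memo hsuf hInv d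
      simpa [pvCm] using h4
  | cons c rest ih =>
    intro d memo hsuf hInv
    have hsuf' : rest <:+ full := List.IsSuffix.trans ⟨[c], rfl⟩ hsuf
    rw [countB]
    cases hget : memo.get? ((c :: rest).length, d) with
    | some v =>
      have := hInv _ _ _ hget
      rw [pv_suffix_drop hsuf] at this
      exact ⟨this, hInv⟩
    | none =>
      rcases pvChar_cases c with rfl | rfl | rfl | ⟨h1, h2, h3⟩
      · obtain ⟨hv, hm⟩ := ih (d + 1) memo hsuf' hInv
        refine ⟨by simp [pvCm, hv], ?_⟩
        have h4 := pvInv_insert full ('(' :: rest) _ hsuf hm d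
        simpa [pvCm, hv] using h4
      · by_cases hd : 0 < d
        · obtain ⟨hv, hm⟩ := ih (d - 1) memo hsuf' hInv
          refine ⟨by simp [pvCm, hv, hd], ?_⟩
          have h4 := pvInv_insert full (')' :: rest) _ hsuf hm d
          simpa [pvCm, hv, hd] using h4
        · refine ⟨by simp [pvCm, hd], ?_⟩
          have h4 := pvInv_insert full (')' :: rest) _ hsuf hInv d
          simpa [pvCm, hd] using h4
      · by_cases hd : 0 < d
        · obtain ⟨hv, hm⟩ := ih (d + 1) memo hsuf' hInv
          obtain ⟨hv2, hm2⟩ := ih (d - 1) _ hsuf' hm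
          refine ⟨by simp [pvCm, hv, hv2, hd], ?_⟩
          have h4 := pvInv_insert full ('?' :: rest) _ hsuf hm2 d
          simpa [pvCm, hv, hv2, hd] using h4
        · obtain ⟨hv, hm⟩ := ih (d + 1) memo hsuf' hInv
          refine ⟨by simp [pvCm, hv, hd], ?_⟩
          have h4 := pvInv_insert full ('?' :: rest) _ hsuf hm d
          simpa [pvCm, hv, hd] using h4
      · refine ⟨by simp [pvCm, h1, h2, h3], ?_⟩
        have h4 := pvInv_insert full (c :: rest) _ hsuf hInv d
        simpa [pvCm, h1, h2, h3] using h4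

theorem solve_alt_eq (template : String) : solve_alt template = pvP template.toList 0 0 % 301907 := by
  have h := countB_correct template.toList template.toList 0 PySem.Dict.empty
      (List.suffix_refl _) (by intro l d v hv; simp [PySem.Dict.get?_empty] at hv)
  rw [solve_alt, h.1, pvCm_eq]

theorem pvGet_set (w : List Int) (i e : Nat) (x : Int) :
    (w.set i x)[e]?.getD 0 = if i = e ∧ i < w.length then x else w[e]?.getD 0 := by
  simp only [List.getElem?_set]
  split_ifs <;> simp_all <;> omega

theorem pvInner_len (c : Char) (ways : List Int) (st : List Int × List Char) (opn : Nat) :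
    (solveInner c ways st opn).1.length = st.1.length := by
  unfold solveInner
  split_ifs <;> simp

theorem pvInner_getD (c : Char) (ways : List Int) (st : List Int × List Char) (opn e : Nat)
    (hlen : opn + 1 < st.1.length) :
    (solveInner c ways st opn).1.getD e 0 =
      if ways.getD opn 0 = 0 then st.1.getD e 0
      else if (c = '(' ∨ c = '?') ∧ e = opn + 1 then
        (st.1.getD e 0 + ways.getD opn 0) % 301907
      else if (c = ')' ∨ c = '?') ∧ 0 < opn ∧ e = opn - 1 then
        (st.1.getD e 0 + ways.getD opn 0) % 301907
      else st.1.getD e 0 := by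
  have hm : ∀ a : Int, PySem.Int.mod a pvModA = a % 301907 := fun a =>
    PySem.Int.mod_eq_emod_of_pos (by norm_num [pvModA])
  rcases pvChar_cases c with rfl | rfl | rfl | ⟨h1, h2, h3⟩ <;>
    unfold solveInner <;>
    [simp only [List.getD_eq_getElem?_getD, hm, Char.reduceEq, eq_self_iff_true, true_or,
       or_true, false_or, or_false, true_and, and_true, false_and, if_true, if_false];
     simp only [List.getD_eq_getElem?_getD, hm, Char.reduceEq, eq_self_iff_true, true_or,
       or_true, false_or, or_false, true_and, and_true, false_and, if_true, if_false];
     simp only [List.getD_eq_getElem?_getD, hm, Char.reduceEq, eq_self_iff_true, true_or,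
       or_true, false_or, or_false, true_and, and_true, false_and, if_true, if_false];
     simp only [List.getD_eq_getElem?_getD, hm, h1, h2, h3, eq_self_iff_true, true_or,
       or_true, false_or, or_false, true_and, and_true, false_and, if_true, if_false,
       if_neg h1, if_neg h2, if_neg h3]]
  · -- c = '('
    by_cases h0 : ways[opn]?.getD (0 : Int) = 0
    · simp [h0]
    · rw [if_neg h0, if_neg h0]
      by_cases he : e = opn + 1
      · subst he; simp [pvGet_set, hlen]
      · have hne : ¬(opn + 1 = e) := fun h => he h.symm
        simp [pvGet_set, hne, he]
  · -- c = ')'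
    by_cases h0 : ways[opn]?.getD (0 : Int) = 0
    · simp [h0]
    · rw [if_neg h0, if_neg h0]
      by_cases hop : 0 < opn
      · have hl2 : opn - 1 < st.1.length := by omega
        rw [if_pos hop]
        by_cases he : e = opn - 1
        · subst he; simp [pvGet_set, hl2, hop]
        · have hne : ¬(opn - 1 = e) := fun h => he h.symm
          simp [pvGet_set, hne, he]
      · rw [if_neg hop, if_neg (fun h => hop h.1)]
  · -- c = '?'
    by_cases h0 : ways[opn]?.getD (0 : Int) = 0
    · simp [h0]
    · rw [if_neg h0, if_neg h0]
      by_cases hop : 0 < opn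
      · have hl2 : opn - 1 < st.1.length := by omega
        rw [if_pos hop]
        have hd1 : ¬(opn + 1 = opn - 1) := by omega
        have hd2 : ¬(opn - 1 = opn + 1) := by omega
        by_cases he1 : e = opn + 1
        · subst he1; simp [pvGet_set, hlen, hd1, hd2]
        · by_cases he2 : e = opn - 1
          · subst he2
            simp [pvGet_set, hl2, hop, hd1, hd2, he1]
          · have hne1 : ¬(opn + 1 = e) := fun h => he1 h.symm
            have hne2 : ¬(opn - 1 = e) := fun h => he2 h.symm
            simp [pvGet_set, hne1, hne2, he1, he2]
      · rw [if_neg hop]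
        by_cases he1 : e = opn + 1
        · subst he1; simp [pvGet_set, hlen, hop]
        · have hne1 : ¬(opn + 1 = e) := fun h => he1 h.symm
          simp [pvGet_set, hne1, he1, hop]
  · -- other characters
    split_ifs <;> rfl

def pvRow (c : Char) (ways : List Int) (m e : Nat) : Int :=
  ((if (c = '(' ∨ c = '?') ∧ 0 < e ∧ e - 1 < m ∧ ways.getD (e - 1) 0 ≠ 0
      then ways.getD (e - 1) 0 else 0) +
   (if (c = ')' ∨ c = '?') ∧ e + 1 < m ∧ ways.getD (e + 1) 0 ≠ 0
      then ways.getD (e + 1) 0 else 0)) % 301907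

theorem pvRow_succ (c : Char) (ways : List Int) (m e : Nat) :
    (if ways.getD m 0 = 0 then pvRow c ways m e
     else if (c = '(' ∨ c = '?') ∧ e = m + 1 then (pvRow c ways m e + ways.getD m 0) % 301907
     else if (c = ')' ∨ c = '?') ∧ 0 < m ∧ e = m - 1 then (pvRow c ways m e + ways.getD m 0) % 301907
     else pvRow c ways m e) = pvRow c ways (m + 1) e := by
  unfold pvRow
  rcases pvChar_cases c with rfl | rfl | rfl | ⟨h1, h2, h3⟩ <;>
    [simp only [Char.reduceEq, eq_self_iff_true, true_or, or_true, false_or, or_false,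
       or_self, true_and, and_true, false_and, if_true, if_false, add_zero, zero_add];
     simp only [Char.reduceEq, eq_self_iff_true, true_or, or_true, false_or, or_false,
       or_self, true_and, and_true, false_and, if_true, if_false, add_zero, zero_add];
     simp only [Char.reduceEq, eq_self_iff_true, true_or, or_true, false_or, or_false,
       or_self, true_and, and_true, false_and, if_true, if_false, add_zero, zero_add];
     simp only [h1, h2, h3, or_self, false_and, if_false, add_zero]]
  · by_cases he1 : e = m + 1
    · subst he1; simp only [Nat.add_sub_cancel, eq_self_iff_true, true_and, and_true, if_true]
      split_ifs <;> omega
    · split_ifs <;> omega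
  · by_cases hm0 : 0 < m ∧ e = m - 1
    · obtain ⟨hm', he⟩ := hm0
      have hme : m = e + 1 := by omega
      subst hme
      simp only [Nat.add_sub_cancel, eq_self_iff_true, true_and, and_true, if_true]
      split_ifs <;> omega
    · split_ifs <;> omega
  · by_cases he1 : e = m + 1
    · subst he1; simp only [Nat.add_sub_cancel, eq_self_iff_true, true_and, and_true, if_true]
      split_ifs <;> omega
    · by_cases hm0 : 0 < m ∧ e = m - 1
      · obtain ⟨hm', he⟩ := hm0
        have hme : m = e + 1 := by omega
        subst hme
        simp only [Nat.add_sub_cancel, eq_self_iff_true, true_and, and_true, if_true]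
        split_ifs <;> omega
      · split_ifs <;> omega
  · split_ifs <;> rfl

theorem pvInner_fold (c : Char) (ways : List Int) (stk : List Char) (n : Nat) :
    ∀ m, m ≤ n →
      (((List.range m).foldl (solveInner c ways) (List.replicate (n + 1) (0 : Int), stk)).1.length
          = n + 1) ∧
      ∀ e, ((List.range m).foldl (solveInner c ways)
          (List.replicate (n + 1) (0 : Int), stk)).1.getD e 0 = pvRow c ways m e := by
  intro m
  induction m with
  | zero =>
    intro _
    refine ⟨by simp, fun e => ?_⟩
    unfold pvRow
    simp [List.getD_eq_getElem?_getD, List.getElem?_replicate]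
    split_ifs <;> simp
  | succ m ih =>
    intro hm
    obtain ⟨ihlen, ihval⟩ := ih (by omega)
    rw [List.range_succ, List.foldl_append, List.foldl_cons, List.foldl_nil]
    refine ⟨by rw [pvInner_len, ihlen], fun e => ?_⟩
    rw [pvInner_getD c ways _ m e (by rw [ihlen]; omega), ihval e]
    rw [← pvRow_succ c ways m e]

theorem pvRow_spec (c : Char) (p : List Char) (ways : List Int) (n : Nat)
    (hlen : p.length < n) (hw : ∀ e, ways.getD e 0 = pvP p 0 e % 301907) (e : Nat) :
    pvRow c ways n e = pvP (p ++ [c]) 0 e % 301907 := by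
  rw [pvP_snoc]
  unfold pvRow
  have z1 : n ≤ e - 1 → pvP p 0 (e - 1) = 0 := fun h => pvP_eq_zero_of_gt _ _ _ (by omega)
  have z2 : n ≤ e + 1 → pvP p 0 (e + 1) = 0 := fun h => pvP_eq_zero_of_gt _ _ _ (by omega)
  rw [hw (e - 1), hw (e + 1)]
  rcases pvChar_cases c with rfl | rfl | rfl | ⟨h1, h2, h3⟩ <;>
    [simp only [Char.reduceEq, eq_self_iff_true, true_or, or_true, false_or, or_false,
       or_self, true_and, and_true, false_and, if_true, if_false, add_zero, zero_add];
     simp only [Char.reduceEq, eq_self_iff_true, true_or, or_true, false_or, or_false,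
       or_self, true_and, and_true, false_and, if_true, if_false, add_zero, zero_add];
     simp only [Char.reduceEq, eq_self_iff_true, true_or, or_true, false_or, or_false,
       or_self, true_and, and_true, false_and, if_true, if_false, add_zero, zero_add];
     simp only [h1, h2, h3, or_self, false_and, if_false, add_zero]]
  · by_cases hn1 : e - 1 < n
    · split_ifs <;> omega
    · rw [z1 (by omega)]
      split_ifs <;> omega
  · by_cases hn2 : e + 1 < n
    · split_ifs <;> omega
    · rw [z2 (by omega)]
      split_ifs <;> omega
  · by_cases hn1 : e - 1 < n
    · by_cases hn2 : e + 1 < n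
      · split_ifs <;> omega
      · rw [z2 (by omega)]
        split_ifs <;> omega
    · rw [z1 (by omega)]
      by_cases hn2 : e + 1 < n
      · split_ifs <;> omega
      · rw [z2 (by omega)]
        split_ifs <;> omega

theorem pvOuter (n : Nat) : ∀ (rest p : List Char) (w : List Int) (stk : List Char),
    p.length + rest.length = n → w.length = n + 1 →
    (∀ e, w.getD e 0 = pvP p 0 e % 301907) →
    ∀ e, (rest.foldl (solveStep n) (w, stk)).1.getD e 0 = pvP (p ++ rest) 0 e % 301907 := by
  intro rest
  induction rest with
  | nil =>
    intro p w stk _ _ hw e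
    simpa using hw e
  | cons c rest ih =>
    intro p w stk h hl hw e
    rw [List.foldl_cons]
    have hfold := pvInner_fold c w stk n n (le_refl n)
    have hrow : ∀ e, (solveStep n (w, stk) c).1.getD e 0 = pvP (p ++ [c]) 0 e % 301907 := by
      intro e
      unfold solveStep
      rw [hfold.2 e]
      exact pvRow_spec c p w n (by simp at h; omega) hw e
    have hlen2 : (solveStep n (w, stk) c).1.length = n + 1 := by
      unfold solveStep; exact hfold.1
    have := ih (p ++ [c]) (solveStep n (w, stk) c).1 (solveStep n (w, stk) c).2
      (by simp at h ⊢; omega) hlen2 hrow e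
    simpa using this

theorem solve_eq (template : String) : solve template = pvP template.toList 0 0 % 301907 := by
  unfold solve
  have h0 : ∀ e, ((List.replicate (template.toList.length + 1) (0 : Int)).set 0 1).getD e 0
      = pvP [] 0 e % 301907 := by
    intro e
    simp only [List.getD_eq_getElem?_getD, pvGet_set, List.length_replicate]
    rcases e with _ | e
    · simp [pvP]
    · simp [pvP, List.getElem?_replicate]
      split_ifs <;> simp
  have := pvOuter template.toList.length template.toList [] _ [] (by simp) (by simp) h0 0
  simpa using this

theorem solve_spec : Claim_equal_solve := by
  intro template _
  unfold Spec_solve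
  rw [solve_eq, solve_alt_eq]
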